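-- pv_equiv track=rewrite | github.com/seutje/DrupalBench | scripts/evaluate.py | build_snippet_for_range
-- ===== SOURCE A (Python) =====
-- def build_snippet_for_range(lines, start, end, base_window, max_chars):
--     if not lines:
--         return None
--
--     start = max(1, start)
--     end = max(start, end)
--     max_chars = max(300, max_chars)
--     adaptive_window = max(5, base_window)
--     total_lines = len(lines)
--
--     while adaptive_window >= 5:
--         window_start = max(1, start - adaptive_window)
--         window_end = min(total_lines, end + adaptive_window)
--         snippet = "\n".join(lines[window_start - 1:window_end])
--         if len(snippet) <= max_chars:
--             return window_start, window_end, snippet, False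
--         adaptive_window //= 2
--
--     window_start = max(1, start - 2)
--     window_end = min(total_lines, end + 2)
--     snippet = "\n".join(lines[window_start - 1:window_end])
--     truncated = False
--     if len(snippet) > max_chars:
--         snippet = snippet[:max_chars].rstrip() + "\n... [truncated]"
--         truncated = True
--     return window_start, window_end, snippet, truncated
-- ===== SOURCE B (Python) =====
-- def build_snippet_for_range(lines, start, end, base_window, max_chars):
--     if not lines:
--         return None
--
--     start = max(1, start)
--     end = max(start, end)
--     max_chars = max(300, max_chars)
--     n = len(lines)
--
--     # prefix sums of line lengths: pref[i] = total chars of lines[:i]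
--     pref = [0]
--     t = 0
--     for l in lines:
--         t += len(l)
--         pref.append(t)
--
--     def bounds(w):
--         return max(1, start - w), min(n, end + w)
--
--     def fits(ws, we):
--         # does "\n".join(lines[ws-1:we]) fit in max_chars?  O(1) via pref
--         lo = ws - 1
--         length = 0 if we <= lo else pref[we] - pref[lo] + (we - lo - 1)
--         return length <= max_chars
--
--     # candidate window sizes, largest first: w, w//2, ..., down to 5
--     sizes = []
--     w = max(5, base_window)
--     while w >= 5:
--         sizes.append(w)
--         w //= 2
--
--     # first candidate window that fits (single join, only for the winner)
--     hit = next((w for w in sizes if fits(*bounds(w))), None)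
--     if hit is not None:
--         ws, we = bounds(hit)
--         return ws, we, "\n".join(lines[ws - 1:we]), False
--
--     # minimal fallback window of 2 context lines
--     ws, we = bounds(2)
--     snippet = "\n".join(lines[ws - 1:we])
--     if fits(ws, we):
--         return ws, we, snippet, False
--     return ws, we, snippet[:max_chars].rstrip() + "\n... [truncated]", True
-- ===== Notes on version B (the rewrite author's own statement) =====
-- stated objective: alternative
-- what changed: B precomputes prefix sums of line lengths and an explicit list of candidate window sizes, then selects the first size that fits by an O(1) arithmetic check (next/find over the candidates) and joins the lines exactly once for the winning window, instead of A's while-loop that joins and measures the full snippet text on every halving step.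
import Mathlib
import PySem

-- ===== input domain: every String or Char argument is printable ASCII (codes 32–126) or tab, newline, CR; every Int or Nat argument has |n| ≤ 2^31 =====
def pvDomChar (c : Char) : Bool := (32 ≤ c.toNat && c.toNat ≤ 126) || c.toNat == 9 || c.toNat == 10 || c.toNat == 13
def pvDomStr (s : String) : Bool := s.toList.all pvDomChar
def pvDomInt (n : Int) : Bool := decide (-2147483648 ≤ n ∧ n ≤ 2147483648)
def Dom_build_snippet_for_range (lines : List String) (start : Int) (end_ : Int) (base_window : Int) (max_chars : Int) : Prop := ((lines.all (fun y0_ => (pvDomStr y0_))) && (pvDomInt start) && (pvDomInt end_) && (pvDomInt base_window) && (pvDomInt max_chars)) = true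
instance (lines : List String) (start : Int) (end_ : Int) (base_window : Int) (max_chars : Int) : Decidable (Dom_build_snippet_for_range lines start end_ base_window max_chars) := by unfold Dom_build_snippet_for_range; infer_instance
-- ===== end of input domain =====

-- B lists the candidate window sizes up front and picks the first one that fits by an O(1)
-- prefix-sum length check, joining the lines only once, instead of A's join-and-measure loop
-- (objective: alternative).

-- ===== PORT A =====
-- A's `while adaptive_window >= 5` loop; falling through returns none.
def pvALoop (lines : List String) (start1 end1 mc n w : Int) : Option (Int × Int × String × Bool) :=
  if h : 5 ≤ w then
    let window_start := max 1 (start1 - w)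
    let window_end := min n (end1 + w)
    let snippet := PySem.Str.join "\n" (PySem.List.slice lines (some (window_start - 1)) (some window_end))
    if PySem.Str.len snippet ≤ mc then
      some (window_start, window_end, snippet, false)
    else
      pvALoop lines start1 end1 mc n (PySem.Int.floordiv w 2)
  else none
termination_by w.toNat
decreasing_by
  have h2 : PySem.Int.floordiv w 2 = w / 2 := PySem.Int.floordiv_eq_ediv_of_pos (by omega)
  rw [h2]; omega

def build_snippet_for_range (lines : List String) (start : Int) (end_ : Int) (base_window : Int) (max_chars : Int) : Option (Int × Int × String × Bool) :=
  if lines = [] then none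
  else
    let start1 := max 1 start
    let end1 := max start1 end_
    let mc := max 300 max_chars
    let aw := max 5 base_window
    let n : Int := (lines.length : Int)
    match pvALoop lines start1 end1 mc n aw with
    | some r => some r
    | none =>
      let window_start := max 1 (start1 - 2)
      let window_end := min n (end1 + 2)
      let snippet := PySem.Str.join "\n" (PySem.List.slice lines (some (window_start - 1)) (some window_end))
      if mc < PySem.Str.len snippet then
        some (window_start, window_end, PySem.Str.rstrip (PySem.Str.slice snippet none (some mc)) ++ "\n... [truncated]", true)
      else
        some (window_start, window_end, snippet, false)

-- ===== PORT B =====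
-- B's prefix-sum list pref (the Python for-loop keeping a running total t).
def pvPref (lines : List String) : List Int :=
  (lines.foldl (fun st l => (st.1 ++ [st.2 + PySem.Str.len l], st.2 + PySem.Str.len l)) ([(0 : Int)], (0 : Int))).1

-- B's `fits`: at every call 0 ≤ ws-1 ≤ we ≤ len pref - 1, so pyGetD is exactly Python's pref[_].
def pvFits (pref : List Int) (mc ws we : Int) : Bool :=
  let lo := ws - 1
  let length := if we ≤ lo then (0 : Int) else PySem.List.pyGetD pref we 0 - PySem.List.pyGetD pref lo 0 + (we - lo - 1)
  length ≤ mc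

-- B's `sizes` list: w, w//2, ..., down to 5 (the small while loop appending to sizes).
def pvSizes (w : Int) : List Int :=
  if _h : 5 ≤ w then w :: pvSizes (PySem.Int.floordiv w 2) else []
termination_by w.toNat
decreasing_by
  have h2 : PySem.Int.floordiv w 2 = w / 2 := PySem.Int.floordiv_eq_ediv_of_pos (by omega)
  rw [h2]; omega

def build_snippet_for_range_alt (lines : List String) (start : Int) (end_ : Int) (base_window : Int) (max_chars : Int) : Option (Int × Int × String × Bool) :=
  if lines = [] then none
  else
    let start1 := max 1 start
    let end1 := max start1 end_
    let mc := max 300 max_chars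
    let n : Int := (lines.length : Int)
    let pref := pvPref lines
    let bounds := fun (w : Int) => (max 1 (start1 - w), min n (end1 + w))
    -- hit = next((w for w in sizes if fits(*bounds(w))), None)
    match (pvSizes (max 5 base_window)).find? (fun w => pvFits pref mc (bounds w).1 (bounds w).2) with
    | some hit =>
      let ws := (bounds hit).1
      let we := (bounds hit).2
      some (ws, we, PySem.Str.join "\n" (PySem.List.slice lines (some (ws - 1)) (some we)), false)
    | none =>
      let ws := (bounds 2).1
      let we := (bounds 2).2
      let snippet := PySem.Str.join "\n" (PySem.List.slice lines (some (ws - 1)) (some we))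
      if pvFits pref mc ws we then some (ws, we, snippet, false)
      else some (ws, we, PySem.Str.rstrip (PySem.Str.slice snippet none (some mc)) ++ "\n... [truncated]", true)

-- ===== PRECONDITION & SPEC =====
def Spec_build_snippet_for_range (lines : List String) (start : Int) (end_ : Int) (base_window : Int) (max_chars : Int) (out : Option (Int × Int × String × Bool)) : Prop := out = build_snippet_for_range_alt lines start end_ base_window max_chars
instance (lines : List String) (start : Int) (end_ : Int) (base_window : Int) (max_chars : Int) (out : Option (Int × Int × String × Bool)) : Decidable (Spec_build_snippet_for_range lines start end_ base_window max_chars out) := by unfold Spec_build_snippet_for_range; infer_instance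

-- ===== CLAIM (what is proved, stated in full; the proofs are below) =====
def Claim_equal_build_snippet_for_range : Prop := ∀ (lines : List String) (start : Int) (end_ : Int) (base_window : Int) (max_chars : Int), Dom_build_snippet_for_range lines start end_ base_window max_chars → Spec_build_snippet_for_range lines start end_ base_window max_chars (build_snippet_for_range lines start end_ base_window max_chars)

-- ===== LEMMAS AND PROOFS =====

-- total length of the first k lines
def pvSumTake (k : Nat) (lines : List String) : Int := ((lines.take k).map PySem.Str.len).sum

-- the tails of the prefix-sum list, starting from running total t
def pvPrefAux : List String → Int → List Int
  | [], _ => []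
  | l :: ls, t => (t + PySem.Str.len l) :: pvPrefAux ls (t + PySem.Str.len l)

lemma pvPref_fold_fst (ls : List String) : ∀ (acc : List Int) (t : Int),
    (ls.foldl (fun st l => (st.1 ++ [st.2 + PySem.Str.len l], st.2 + PySem.Str.len l)) (acc, t)).1
      = acc ++ pvPrefAux ls t := by
  induction ls with
  | nil => intro acc t; simp [pvPrefAux]
  | cons l ls ih => intro acc t; rw [List.foldl_cons, ih]; simp [pvPrefAux]

lemma pvPref_eq (lines : List String) : pvPref lines = 0 :: pvPrefAux lines 0 := by
  unfold pvPref; rw [pvPref_fold_fst]; rfl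

lemma pvPrefAux_length (ls : List String) : ∀ t, (pvPrefAux ls t).length = ls.length := by
  induction ls with
  | nil => intro t; simp [pvPrefAux]
  | cons l ls ih => intro t; simp [pvPrefAux, ih]

lemma pvPrefAux_getD (ls : List String) : ∀ (t : Int) (k : Nat), k < ls.length →
    (pvPrefAux ls t).getD k 0 = t + pvSumTake (k + 1) ls := by
  induction ls with
  | nil => intro t k h; simp at h
  | cons l ls ih =>
    intro t k h
    cases k with
    | zero => simp [pvPrefAux, pvSumTake]
    | succ k =>
      have hk : k < ls.length := by simpa using h
      simp only [pvPrefAux, List.getD_cons_succ]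
      rw [ih (t + PySem.Str.len l) k hk]
      simp [pvSumTake, List.take_succ_cons]
      ring

lemma pvPref_getD (lines : List String) (i : Int) (h0 : 0 ≤ i) (h1 : i ≤ (lines.length : Int)) :
    PySem.List.pyGetD (pvPref lines) i 0 = pvSumTake i.toNat lines := by
  rw [pvPref_eq]
  have hlen : ((0 : Int) :: pvPrefAux lines 0).length = lines.length + 1 := by
    simp [pvPrefAux_length]
  rw [PySem.List.pyGetD_eq_getElem _ _ h0 (by rw [hlen]; exact_mod_cast by omega)]
  rw [← List.getD_eq_getElem _ 0]
  cases hk : i.toNat with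
  | zero => simp [pvSumTake]
  | succ k =>
    simp only [List.getD_cons_succ]
    rw [pvPrefAux_getD lines 0 k (by omega)]
    rw [← hk]; simp

-- length of the char-level join for nonempty parts
lemma pvCharsJoin_len (rest : List (List Char)) : ∀ (p : List Char),
    (PySem.Chars.join ['\n'] (p :: rest)).length = ((p :: rest).map List.length).sum + rest.length := by
  induction rest with
  | nil => intro p; simp [PySem.Chars.join, List.intercalate]
  | cons q rest ih =>
    intro p
    rw [PySem.Chars.join_cons_cons]
    simp only [List.length_append, ih q, List.map_cons, List.sum_cons, List.length_cons]
    simp; omega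

lemma pvSum_strlen (parts : List String) :
    (parts.map PySem.Str.len).sum = (((parts.map String.toList).map List.length).sum : Int) := by
  induction parts with
  | nil => simp
  | cons p parts ih => simp [PySem.Str.len, ih]

-- length of "\n".join(parts) for nonempty parts
lemma pvJoin_len (parts : List String) (h : parts ≠ []) :
    PySem.Str.len (PySem.Str.join "\n" parts)
      = (parts.map PySem.Str.len).sum + (parts.length : Int) - 1 := by
  obtain ⟨p, rest, rfl⟩ := List.exists_cons_of_ne_nil h
  rw [PySem.Str.len_eq, PySem.Str.toList_join, pvSum_strlen]
  have hch := pvCharsJoin_len (rest.map String.toList) p.toList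
  simp only [List.map_cons] at hch ⊢
  have hsep : "\n".toList = ['\n'] := rfl
  rw [hsep, hch]
  push_cast
  simp
  omega

lemma pvSumTake_split (lines : List String) (a b : Nat) (hab : a ≤ b) :
    pvSumTake b lines = pvSumTake a lines + (((lines.drop a).take (b - a)).map PySem.Str.len).sum := by
  unfold pvSumTake
  have : b = a + (b - a) := by omega
  rw [this, List.take_add]
  simp

-- the key lemma: B's O(1) fits check decides exactly "A's joined slice fits"
lemma pvFits_eq (lines : List String) (mc ws we : Int)
    (hws : 1 ≤ ws) (hwe0 : 0 ≤ we) (hwe : we ≤ (lines.length : Int)) :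
    pvFits (pvPref lines) mc ws we
      = decide (PySem.Str.len (PySem.Str.join "\n" (PySem.List.slice lines (some (ws - 1)) (some we))) ≤ mc) := by
  have hlo0 : (0 : Int) ≤ ws - 1 := by omega
  have hlen : (if we ≤ ws - 1 then (0 : Int)
        else PySem.List.pyGetD (pvPref lines) we 0 - PySem.List.pyGetD (pvPref lines) (ws - 1) 0 + (we - (ws - 1) - 1))
      = PySem.Str.len (PySem.Str.join "\n" (PySem.List.slice lines (some (ws - 1)) (some we))) := by
    rw [PySem.List.slice_toNat lines hlo0 hwe0]
    by_cases hcase : we ≤ ws - 1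
    · have h0 : we.toNat - (ws - 1).toNat = 0 := by omega
      rw [if_pos hcase, h0]
      simp [PySem.Str.join, PySem.Chars.join, List.intercalate, PySem.Str.len]
    · rw [if_neg hcase]
      have hlt : (ws - 1).toNat < we.toNat := by omega
      have hwen : we.toNat ≤ lines.length := by omega
      set a := (ws - 1).toNat with ha
      set b := we.toNat with hb
      have hl : ((lines.drop a).take (b - a)).length = b - a := by
        simp [List.length_take, List.length_drop]; omega
      have hparts : ((lines.drop a).take (b - a)) ≠ [] := by
        intro hnil; rw [hnil] at hl; simp at hl; omega
      rw [pvJoin_len _ hparts, hl]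
      rw [pvPref_getD lines we hwe0 hwe, pvPref_getD lines (ws - 1) hlo0 (by omega)]
      rw [pvSumTake_split lines a b (by omega)]
      simp only [← ha]
      omega
  simp only [pvFits, hlen]

-- A's search loop equals "first candidate size that fits" over B's sizes list
lemma pvLoop_eq_find (lines : List String) (start1 end1 mc : Int)
    (h1 : 1 ≤ start1) (h2 : start1 ≤ end1) (w : Int) :
    pvALoop lines start1 end1 mc (lines.length : Int) w
      = match (pvSizes w).find?
            (fun v => pvFits (pvPref lines) mc (max 1 (start1 - v)) (min (lines.length : Int) (end1 + v))) with
        | some v =>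
          some (max 1 (start1 - v), min (lines.length : Int) (end1 + v),
            PySem.Str.join "\n" (PySem.List.slice lines (some (max 1 (start1 - v) - 1)) (some (min (lines.length : Int) (end1 + v)))), false)
        | none => none := by
  by_cases h : 5 ≤ w
  · rw [pvALoop, pvSizes]
    simp only [dif_pos h, List.find?_cons]
    have hfits := pvFits_eq lines mc (max 1 (start1 - w)) (min (lines.length : Int) (end1 + w))
      (le_max_left _ _) (by omega) (min_le_left _ _)
    have hrec := pvLoop_eq_find lines start1 end1 mc h1 h2 (PySem.Int.floordiv w 2)
    by_cases hle : PySem.Str.len (PySem.Str.join "\n"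
        (PySem.List.slice lines (some (max 1 (start1 - w) - 1)) (some (min (lines.length : Int) (end1 + w))))) ≤ mc
    · rw [if_pos hle]
      have : pvFits (pvPref lines) mc (max 1 (start1 - w)) (min (lines.length : Int) (end1 + w)) = true := by
        rw [hfits]; exact decide_eq_true hle
      simp [this]
    · rw [if_neg hle]
      have : pvFits (pvPref lines) mc (max 1 (start1 - w)) (min (lines.length : Int) (end1 + w)) = false := by
        rw [hfits]; exact decide_eq_false hle
      simp only [this]
      exact hrec
  · rw [pvALoop, pvSizes]
    simp [h]
termination_by w.toNat
decreasing_by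
  have h2' : PySem.Int.floordiv w 2 = w / 2 := PySem.Int.floordiv_eq_ediv_of_pos (by omega)
  rw [h2']; omega

-- ===== VERDICT (by name: the statement is the Claim_ definition above) =====
theorem build_snippet_for_range_spec : Claim_equal_build_snippet_for_range := by
  intro lines start end_ base_window max_chars _hdom
  unfold Spec_build_snippet_for_range build_snippet_for_range build_snippet_for_range_alt
  by_cases hnil : lines = []
  · simp [hnil]
  · simp only [if_neg hnil]
    have h1 : 1 ≤ max 1 start := le_max_left _ _
    have h2 : max 1 start ≤ max (max 1 start) end_ := le_max_left _ _
    rw [pvLoop_eq_find lines (max 1 start) (max (max 1 start) end_) (max 300 max_chars) h1 h2]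
    have hfits := pvFits_eq lines (max 300 max_chars) (max 1 (max 1 start - 2))
      (min (lines.length : Int) (max (max 1 start) end_ + 2))
      (le_max_left _ _) (by omega) (min_le_left _ _)
    cases hfind : (pvSizes (max 5 base_window)).find?
        (fun v => pvFits (pvPref lines) (max 300 max_chars) (max 1 (max 1 start - v)) (min (lines.length : Int) (max (max 1 start) end_ + v))) with
    | some v => simp
    | none =>
      simp only
      rw [hfits]
      by_cases hle : PySem.Str.len (PySem.Str.join "\n"
          (PySem.List.slice lines (some (max 1 (max 1 start - 2) - 1)) (some (min (lines.length : Int) (max (max 1 start) end_ + 2))))) ≤ max 300 max_chars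
      · rw [if_neg (by omega), decide_eq_true hle]; simp
      · rw [if_pos (by omega), decide_eq_false hle]; simp
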